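-- pv_equiv track=rewrite | github.com/Aarogaming/Workbench | scripts/check_attestation_identity_wiring.py | check_workflow_content
-- ===== SOURCE A (Python) =====
-- REQUIRED_STEP = "Verify artifact attestations"
--
-- REQUIRED_TOKENS: tuple[str, ...] = (
--     "scripts/verify_attestations.py",
--     '--repo "${{ github.repository }}"',
--     '--signer-workflow "${{ github.repository }}/.github/workflows/nightly-evals.yml"',
--     '--predicate-type "https://slsa.dev/provenance/v1"',
-- )
--
-- def _step_line_indexes(lines: list[str], step_name: str) -> list[int]:
--     needle = f"- name: {step_name}"
--     return [idx for idx, line in enumerate(lines) if line.strip() == needle]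
--
-- def _step_blocks(lines: list[str], step_name: str) -> list[list[str]]:
--     indexes = _step_line_indexes(lines, step_name)
--     name_indexes = [
--         idx for idx, line in enumerate(lines) if line.lstrip().startswith("- name:")
--     ]
--     blocks: list[list[str]] = []
--     for idx in indexes:
--         next_indexes = [value for value in name_indexes if value > idx]
--         end = next_indexes[0] if next_indexes else len(lines)
--         blocks.append(lines[idx:end])
--     return blocks
--
-- def check_workflow_content(content: str, workflow_label: str) -> list[str]:
--     lines = content.splitlines()
--     blocks = _step_blocks(lines, REQUIRED_STEP)
--     if not blocks:
--         return [f"{workflow_label}: missing step '{REQUIRED_STEP}'"]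
--
--     issues: list[str] = []
--     for token in REQUIRED_TOKENS:
--         if not any(any(token in line for line in block) for block in blocks):
--             issues.append(
--                 f"{workflow_label}: step '{REQUIRED_STEP}' missing expected token '{token}'"
--             )
--     return issues
-- ===== SOURCE B (Python) =====
-- REQUIRED_STEP = "Verify artifact attestations"
--
-- REQUIRED_TOKENS: tuple[str, ...] = (
--     "scripts/verify_attestations.py",
--     '--repo "${{ github.repository }}"',
--     '--signer-workflow "${{ github.repository }}/.github/workflows/nightly-evals.yml"',
--     '--predicate-type "https://slsa.dev/provenance/v1"',
-- )
--
-- def check_workflow_content(content: str, workflow_label: str) -> list[str]: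
--     needle = f"- name: {REQUIRED_STEP}"
--     blocks: list[list[str]] = []
--     cur: list[str] | None = None
--     for line in content.splitlines():
--         if line.lstrip().startswith("- name:"):
--             if cur is not None:
--                 blocks.append(cur)
--             cur = [line] if line.strip() == needle else None
--         elif cur is not None:
--             cur.append(line)
--     if cur is not None:
--         blocks.append(cur)
--
--     if not blocks:
--         return [f"{workflow_label}: missing step '{REQUIRED_STEP}'"]
--
--     issues: list[str] = []
--     lines_of_blocks = [line for block in blocks for line in block]
--     for token in REQUIRED_TOKENS:
--         if not any(token in line for line in lines_of_blocks):
--             issues.append(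
--                 f"{workflow_label}: step '{REQUIRED_STEP}' missing expected token '{token}'"
--             )
--     return issues
-- ===== Notes on version B (the rewrite author's own statement) =====
-- stated objective: simpler
-- what changed: Replaced the index-list machinery (enumerate twice, filter next name-indexes per match, absolute slicing) by a single linear pass over the lines that maintains the current open block, then one flattened token scan.
import Mathlib
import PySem

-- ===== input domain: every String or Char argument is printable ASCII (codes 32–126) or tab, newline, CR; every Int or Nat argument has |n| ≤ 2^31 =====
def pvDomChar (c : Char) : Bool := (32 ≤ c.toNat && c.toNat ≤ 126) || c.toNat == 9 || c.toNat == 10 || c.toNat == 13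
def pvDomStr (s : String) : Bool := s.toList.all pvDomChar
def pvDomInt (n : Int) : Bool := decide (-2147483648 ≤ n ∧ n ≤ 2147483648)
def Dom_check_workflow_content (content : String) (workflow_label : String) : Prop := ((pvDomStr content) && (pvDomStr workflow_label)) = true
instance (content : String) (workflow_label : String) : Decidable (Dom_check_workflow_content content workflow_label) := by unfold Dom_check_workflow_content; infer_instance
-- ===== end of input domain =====

-- B is a single linear pass maintaining the current open block instead of A's index-list
-- machinery; same return value, chosen for simplicity (not measured faster).

def REQUIRED_STEP : String := "Verify artifact attestations"

def REQUIRED_TOKENS : List String :=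
  ["scripts/verify_attestations.py",
   "--repo \"${{ github.repository }}\"",
   "--signer-workflow \"${{ github.repository }}/.github/workflows/nightly-evals.yml\"",
   "--predicate-type \"https://slsa.dev/provenance/v1\""]

-- ===== PORT A =====
def pv_step_line_indexes (lines : List String) (step_name : String) : List Int :=
  let needle := "- name: " ++ step_name
  ((PySem.List.enumerate lines 0).filter (fun p => PySem.Str.strip p.2 == needle)).map (fun p => p.1)

def pv_step_blocks (lines : List String) (step_name : String) : List (List String) :=
  let indexes := pv_step_line_indexes lines step_name
  let name_indexes :=
    ((PySem.List.enumerate lines 0).filter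
      (fun p => PySem.Str.startswith (PySem.Str.lstrip p.2) "- name:")).map (fun p => p.1)
  indexes.foldl (fun blocks idx =>
    let next_indexes := name_indexes.filter (fun v => idx < v)
    let e : Int := match next_indexes.head? with
      | some v => v
      | none => (lines.length : Int)
    blocks ++ [PySem.List.slice lines (some idx) (some e)]) []

def check_workflow_content (content : String) (workflow_label : String) : List String :=
  let lines := PySem.Str.splitlines content
  let blocks := pv_step_blocks lines REQUIRED_STEP
  if blocks.isEmpty then
    [workflow_label ++ ": missing step '" ++ REQUIRED_STEP ++ "'"]
  else
    REQUIRED_TOKENS.foldl (fun issues token =>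
      if !(blocks.any (fun block => block.any (fun line => PySem.Str.isIn token line))) then
        issues ++ [workflow_label ++ ": step '" ++ REQUIRED_STEP ++ "' missing expected token '" ++ token ++ "'"]
      else issues) []

-- ===== PORT B =====
-- the loop of Source B: state = (blocks so far, current open block or none)
def pvAltScan (needle : String) : List String → List (List String) → Option (List String) → List (List String)
  | [], blocks, cur =>
      match cur with
      | some b => blocks ++ [b]
      | none => blocks
  | l :: rest, blocks, cur =>
      if PySem.Str.startswith (PySem.Str.lstrip l) "- name:" then
        let blocks' := match cur with
          | some b => blocks ++ [b]
          | none => blocks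
        pvAltScan needle rest blocks' (if PySem.Str.strip l == needle then some [l] else none)
      else
        match cur with
        | some b => pvAltScan needle rest blocks (some (b ++ [l]))
        | none => pvAltScan needle rest blocks none

def check_workflow_content_alt (content : String) (workflow_label : String) : List String :=
  let needle := "- name: " ++ REQUIRED_STEP
  let blocks := pvAltScan needle (PySem.Str.splitlines content) [] none
  if blocks.isEmpty then
    [workflow_label ++ ": missing step '" ++ REQUIRED_STEP ++ "'"]
  else
    let lines_of_blocks := blocks.flatMap (fun block => block)
    REQUIRED_TOKENS.foldl (fun issues token =>
      if !(lines_of_blocks.any (fun line => PySem.Str.isIn token line)) then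
        issues ++ [workflow_label ++ ": step '" ++ REQUIRED_STEP ++ "' missing expected token '" ++ token ++ "'"]
      else issues) []

-- ===== PRECONDITION & SPEC =====
def Spec_check_workflow_content (content : String) (workflow_label : String) (out : List String) : Prop := out = check_workflow_content_alt content workflow_label
instance (content : String) (workflow_label : String) (out : List String) : Decidable (Spec_check_workflow_content content workflow_label out) := by unfold Spec_check_workflow_content; infer_instance

-- ===== CLAIM (what is proved, stated in full; the proofs are below) =====
def Claim_equal_check_workflow_content : Prop := ∀ (content : String) (workflow_label : String), Dom_check_workflow_content content workflow_label → Spec_check_workflow_content content workflow_label (check_workflow_content content workflow_label)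

-- ===== LEMMAS AND PROOFS =====

-- abbreviations for the two line predicates
def pvNameP (l : String) : Bool := PySem.Str.startswith (PySem.Str.lstrip l) "- name:"
def pvMatchP (needle : String) (l : String) : Bool := PySem.Str.strip l == needle

-- recursive characterisation of A's blocks
def pvG (needle : String) : List String → List (List String)
  | [] => []
  | l :: rest =>
      if pvMatchP needle l then (l :: rest.takeWhile (fun x => !pvNameP x)) :: pvG needle rest
      else pvG needle rest

-- key fact: a line whose strip equals the needle is itself a "- name:" line
theorem pv_match_imp_name (l : String) :
    pvMatchP ("- name: " ++ REQUIRED_STEP) l = true → pvNameP l = true := by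
  intro h
  have hstrip : PySem.Str.strip l = "- name: " ++ REQUIRED_STEP := by
    simpa [pvMatchP] using h
  have htl : PySem.Chars.strip l.toList = ("- name: " ++ REQUIRED_STEP).toList := by
    rw [← PySem.Str.toList_strip, hstrip]
  -- rstrip only removes a suffix, so the needle is a prefix of lstrip l
  have hpre : ("- name: " ++ REQUIRED_STEP).toList <+: PySem.Chars.lstrip l.toList := by
    rw [← htl]
    show PySem.Chars.rstrip (PySem.Chars.lstrip l.toList) <+: PySem.Chars.lstrip l.toList
    unfold PySem.Chars.rstrip
    have := (List.dropWhile_suffix (l := (PySem.Chars.lstrip l.toList).reverse)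
      (p := PySem.Chars.isspace)).reverse
    simpa using this
  have hname : ("- name:").toList <+: ("- name: " ++ REQUIRED_STEP).toList := by decide
  have : ("- name:").toList <+: PySem.Chars.lstrip l.toList := hname.trans hpre
  simp only [pvNameP, PySem.Str.startswith, PySem.Str.toList_lstrip]
  exact (PySem.Chars.startswith_iff _ _).mpr this

-- indexes of the lines satisfying p, as A computes them
def pvIdxs (p : String → Bool) (lines : List String) : List Int :=
  ((PySem.List.enumerate lines 0).filter (fun q => p q.2)).map (fun q => q.1)

-- A's block end for a match at idx
def pvEnd (lines : List String) (idx : Int) : Int :=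
  match ((pvIdxs pvNameP lines).filter (fun v => idx < v)).head? with
  | some v => v
  | none => (lines.length : Int)

theorem pv_foldl_append {α β : Type} (f : α → β) (L : List α) (acc : List β) :
    L.foldl (fun bs a => bs ++ [f a]) acc = acc ++ L.map f := by
  induction L generalizing acc with
  | nil => simp
  | cons a L ih => simp [ih]

theorem pv_enum_shift {α : Type} (xs : List α) (s : Int) :
    PySem.List.enumerate xs (s + 1) = (PySem.List.enumerate xs s).map (fun p => (p.1 + 1, p.2)) := by
  induction xs generalizing s with
  | nil => simp [PySem.List.enumerate_nil]
  | cons x xs ih => simp [PySem.List.enumerate_cons, ih]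

theorem pv_idxs_cons (p : String → Bool) (l : String) (xs : List String) :
    pvIdxs p (l :: xs) =
      (if p l then [(0 : Int)] else []) ++ (pvIdxs p xs).map (fun v => v + 1) := by
  unfold pvIdxs
  rw [PySem.List.enumerate_cons, show ((0 : Int) + 1) = 0 + 1 by ring, pv_enum_shift]
  rw [List.filter_cons, List.filter_map]
  by_cases hp : p l = true <;> simp [hp, Function.comp_def]

theorem pv_idxs_nonneg (p : String → Bool) (xs : List String) (v : Int)
    (hv : v ∈ pvIdxs p xs) : 0 ≤ v := by
  unfold pvIdxs at hv
  simp only [List.mem_map, List.mem_filter] at hv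
  obtain ⟨q, ⟨hq, -⟩, rfl⟩ := hv
  rw [PySem.List.mem_enumerate_iff] at hq
  obtain ⟨k, hk, rfl⟩ := hq
  simp

theorem pvEnd_nonneg (lines : List String) (idx : Int) : 0 ≤ pvEnd lines idx := by
  unfold pvEnd
  cases hh : ((pvIdxs pvNameP lines).filter (fun v => idx < v)).head? with
  | none => simp
  | some v =>
      simp only
      exact pv_idxs_nonneg _ _ _ (List.mem_of_mem_filter (List.mem_of_mem_head? hh))

-- take up to the first name index = takeWhile not-name
theorem pvTW (xs : List String) :
    xs.take (((pvIdxs pvNameP xs).head?.getD (xs.length : Int)).toNat)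
      = xs.takeWhile (fun x => !pvNameP x) := by
  induction xs with
  | nil => simp
  | cons x xs ih =>
      rw [pv_idxs_cons]
      by_cases hp : pvNameP x = true
      · simp [hp]
      · have hp' : pvNameP x = false := by simpa using hp
        have hx : ∀ (o : Option Int),
            (((o.map (fun v => v + 1)).getD ((xs.length : Int) + 1))) =
              (o.getD (xs.length : Int)) + 1 := by
          intro o; cases o <;> simp
        have h0 : 0 ≤ (pvIdxs pvNameP xs).head?.getD (xs.length : Int) := by
          cases hh : (pvIdxs pvNameP xs).head? with
          | none => simp
          | some v => simpa using pv_idxs_nonneg _ _ _ (List.mem_of_mem_head? hh)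
        simp only [hp', Bool.false_eq_true, if_false, List.nil_append, List.head?_map,
          List.takeWhile_cons, List.length_cons]
        rw [show ((xs.length + 1 : Nat) : Int) = (xs.length : Int) + 1 by push_cast; ring, hx]
        rw [show ((pvIdxs pvNameP xs).head?.getD (xs.length : Int) + 1).toNat
              = ((pvIdxs pvNameP xs).head?.getD (xs.length : Int)).toNat + 1 by omega]
        simp [List.take_succ_cons, ih]

-- shifting one line off the front shifts a block at a positive index
theorem pv_shift (l : String) (rest : List String) (idx : Int) (h0 : 0 ≤ idx) :
    PySem.List.slice (l :: rest) (some (idx + 1)) (some (pvEnd (l :: rest) (idx + 1)))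
      = PySem.List.slice rest (some idx) (some (pvEnd rest idx)) := by
  have hend : pvEnd (l :: rest) (idx + 1) = pvEnd rest idx + 1 := by
    unfold pvEnd
    rw [pv_idxs_cons, List.filter_append, List.filter_map]
    have h1 : (if pvNameP l then [(0 : Int)] else []).filter (fun v => idx + 1 < v) = [] := by
      split <;> simp
      omega
    have h2 : ((fun v => decide (idx + 1 < v)) ∘ fun v => v + 1) = fun v => decide (idx < v) := by
      funext v; simp only [Function.comp_apply, decide_eq_decide]; omega
    rw [h1, h2, List.nil_append, List.head?_map]
    cases ((pvIdxs pvNameP rest).filter (fun v => idx < v)).head? <;> simp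
  rw [hend]
  have he : 0 ≤ pvEnd rest idx := pvEnd_nonneg rest idx
  rw [PySem.List.slice_toNat (l :: rest) (show (0:Int) ≤ idx + 1 by omega)
        (show (0:Int) ≤ pvEnd rest idx + 1 by omega),
      PySem.List.slice_toNat rest h0 he]
  rw [show (idx + 1).toNat = idx.toNat + 1 by omega,
      show (pvEnd rest idx + 1).toNat = (pvEnd rest idx).toNat + 1 by omega]
  simp [Nat.add_sub_add_right]

-- the block opened at index 0
theorem pv_head (l : String) (rest : List String) :
    PySem.List.slice (l :: rest) (some 0) (some (pvEnd (l :: rest) 0))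
      = l :: rest.takeWhile (fun x => !pvNameP x) := by
  have hend : pvEnd (l :: rest) 0 = (pvIdxs pvNameP rest).head?.getD (rest.length : Int) + 1 := by
    unfold pvEnd
    rw [pv_idxs_cons, List.filter_append, List.filter_map]
    have h1 : (if pvNameP l then [(0 : Int)] else []).filter (fun v => (0 : Int) < v) = [] := by
      split <;> simp
    have h2 : (pvIdxs pvNameP rest).filter ((fun v => decide ((0 : Int) < v)) ∘ fun v => v + 1)
        = pvIdxs pvNameP rest := by
      apply List.filter_eq_self.mpr
      intro v hv
      have := pv_idxs_nonneg _ _ _ hv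
      simp; omega
    rw [h1, h2, List.nil_append, List.head?_map]
    cases (pvIdxs pvNameP rest).head? <;> simp
  have h0 : 0 ≤ (pvIdxs pvNameP rest).head?.getD (rest.length : Int) := by
    cases hh : (pvIdxs pvNameP rest).head? with
    | none => simp
    | some v => simpa using pv_idxs_nonneg _ _ _ (List.mem_of_mem_head? hh)
  rw [hend, PySem.List.slice_toNat (l :: rest) (le_refl (0:Int))
        (show (0:Int) ≤ (pvIdxs pvNameP rest).head?.getD (rest.length : Int) + 1 by omega)]
  simp only [Int.toNat_zero, List.drop_zero, Nat.sub_zero]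
  rw [show ((pvIdxs pvNameP rest).head?.getD (rest.length : Int) + 1).toNat
        = ((pvIdxs pvNameP rest).head?.getD (rest.length : Int)).toNat + 1 by omega]
  rw [List.take_succ_cons, pvTW]

-- A's fold written as a map over the match indexes
theorem pv_blocks_map (L : List String) :
    pv_step_blocks L REQUIRED_STEP
      = (pvIdxs (pvMatchP ("- name: " ++ REQUIRED_STEP)) L).map
          (fun idx => PySem.List.slice L (some idx) (some (pvEnd L idx))) := by
  show List.foldl
      (fun blocks idx => blocks ++ [PySem.List.slice L (some idx) (some (pvEnd L idx))]) []
      (pvIdxs (pvMatchP ("- name: " ++ REQUIRED_STEP)) L) = _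
  rw [pv_foldl_append, List.nil_append]

-- A's blocks equal pvG
theorem pvA_blocks_eq_G (lines : List String) :
    pv_step_blocks lines REQUIRED_STEP = pvG ("- name: " ++ REQUIRED_STEP) lines := by
  rw [pv_blocks_map]
  induction lines with
  | nil => simp [pvIdxs, pvG]
  | cons l rest ih =>
      rw [pv_idxs_cons, List.map_append, List.map_map]
      have hshift : ((pvIdxs (pvMatchP ("- name: " ++ REQUIRED_STEP)) rest).map
            ((fun idx => PySem.List.slice (l :: rest) (some idx) (some (pvEnd (l :: rest) idx)))
              ∘ fun v => v + 1))
          = (pvIdxs (pvMatchP ("- name: " ++ REQUIRED_STEP)) rest).map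
              (fun idx => PySem.List.slice rest (some idx) (some (pvEnd rest idx))) := by
        apply List.map_congr_left
        intro idx hidx
        exact pv_shift l rest idx (pv_idxs_nonneg _ _ _ hidx)
      rw [hshift, ih]
      by_cases hm : pvMatchP ("- name: " ++ REQUIRED_STEP) l = true
      · have hpg : pvG ("- name: " ++ REQUIRED_STEP) (l :: rest)
            = (l :: rest.takeWhile (fun x => !pvNameP x)) :: pvG ("- name: " ++ REQUIRED_STEP) rest := by
          simp [pvG, hm]
        simp only [hm, if_true, List.map_cons, List.map_nil, List.singleton_append, hpg, pv_head]
      · simp [hm, pvG]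

-- proof-side view of B's scan: the pending state only
def pvH (needle : String) : List String → Option (List String) → List (List String)
  | [], none => []
  | [], some b => [b]
  | l :: rest, cur =>
      if pvNameP l then
        (match cur with | some b => [b] | none => []) ++
          pvH needle rest (if pvMatchP needle l then some [l] else none)
      else
        match cur with
        | some b => pvH needle rest (some (b ++ [l]))
        | none => pvH needle rest none

theorem pvAltScan_eq_append_H (needle : String) (lines : List String)
    (blocks : List (List String)) (cur : Option (List String)) :
    pvAltScan needle lines blocks cur = blocks ++ pvH needle lines cur := by
  induction lines generalizing blocks cur with
  | nil => cases cur <;> simp [pvAltScan, pvH]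
  | cons l rest ih =>
      cases cur <;>
        simp only [pvAltScan, pvH, pvNameP, pvMatchP] <;>
        split <;> simp [ih, List.append_assoc]

theorem pvH_some (needle : String) (lines : List String) (b : List String) :
    pvH needle lines (some b) =
      (b ++ lines.takeWhile (fun x => !pvNameP x)) :: pvH needle lines none := by
  induction lines generalizing b with
  | nil => simp [pvH]
  | cons l rest ih =>
      by_cases hn : pvNameP l = true
      · simp [pvH, hn]
      · simp [pvH, hn, ih, List.append_assoc]

theorem pvH_none_eq_G (lines : List String) :
    pvH ("- name: " ++ REQUIRED_STEP) lines none = pvG ("- name: " ++ REQUIRED_STEP) lines := by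
  induction lines with
  | nil => simp [pvH, pvG]
  | cons l rest ih =>
      by_cases hm : pvMatchP ("- name: " ++ REQUIRED_STEP) l = true
      · have hn := pv_match_imp_name l hm
        simp [pvH, pvG, hm, hn, pvH_some, ih]
      · by_cases hn : pvNameP l = true <;> simp [pvH, pvG, hm, hn, ih]

-- B's scan equals pvG
theorem pvAlt_eq_G (lines : List String) :
    pvAltScan ("- name: " ++ REQUIRED_STEP) lines [] none = pvG ("- name: " ++ REQUIRED_STEP) lines := by
  rw [pvAltScan_eq_append_H, pvH_none_eq_G]
  simp

-- ===== VERDICT (by name: the statement is the Claim_ definition above) =====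
theorem check_workflow_content_spec : Claim_equal_check_workflow_content := by
  intro content workflow_label _
  unfold Spec_check_workflow_content check_workflow_content check_workflow_content_alt
  simp only [pvA_blocks_eq_G, pvAlt_eq_G, List.any_flatMap]
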